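-- pv_equiv track=rewrite | github.com/AyushAgnihotri2025/CP-Solutions | GeeksforGeeks/Python3/Medium/Buy Maximum Stocks if i stocks can be bought on i-th day/buy-maximum-stocks-if-i-stocks-can-be-bought-on-ith-day.py | buyMaximumProducts
-- ===== SOURCE A (Python) =====
-- from typing import List
--
-- def buyMaximumProducts(n : int, k : int, price : List[int]) -> int:
--     # code here
--     price1, count, pos = sorted([[price[i], i+1] for i in range(n)]), 0, 0
--     while k>0 and pos<n:
--         if k<price1[pos][0]:
--             break
--         elif k>=price1[pos][0]*price1[pos][1]:
--             k-=price1[pos][0]*price1[pos][1]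
--             count+=price1[pos][1]
--             pos+=1
--         else:
--             price1[pos][1]-=1
--     return count
-- ===== SOURCE B (Python) =====
-- def buyMaximumProducts(n, k, price):
--     count = 0
--     for p, cap in sorted((price[i], i + 1) for i in range(n)):
--         if k <= 0 or k < p:
--             break
--         buy = cap if k >= p * cap else k // p
--         count += buy
--         k -= p * buy
--     return count
-- ===== Notes on version B (the rewrite author's own statement) =====
-- stated objective: simpler
-- what changed: A shrinks the day's capacity one unit at a time inside its while loop until the remaining budget suffices; B makes a single pass over the sorted (price, day) pairs and computes each purchase in closed form (cap if affordable in full, else k // p), so the inner decrement loop disappears.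
import Mathlib
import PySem

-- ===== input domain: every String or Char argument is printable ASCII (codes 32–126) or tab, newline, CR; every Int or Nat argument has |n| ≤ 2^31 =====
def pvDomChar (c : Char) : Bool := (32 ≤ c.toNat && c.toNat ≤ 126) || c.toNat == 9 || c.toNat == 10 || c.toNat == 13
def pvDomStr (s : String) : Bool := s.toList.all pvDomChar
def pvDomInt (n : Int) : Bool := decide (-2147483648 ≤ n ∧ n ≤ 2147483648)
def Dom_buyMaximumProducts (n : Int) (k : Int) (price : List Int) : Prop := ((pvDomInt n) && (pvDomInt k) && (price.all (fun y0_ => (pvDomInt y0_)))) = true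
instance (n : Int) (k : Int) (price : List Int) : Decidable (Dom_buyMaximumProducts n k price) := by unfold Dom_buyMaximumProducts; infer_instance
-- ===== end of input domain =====

-- B replaces A's one-unit-at-a-time inner decrement loop by a single closed-form purchase
-- (buy = cap, or k // p) per sorted price, for a plainer single pass (objective: simpler).

-- ===== PORT A =====
-- the sorted [price[i], i+1] pairs, the construction both Pythons share
def pvPairs (n : Int) (price : List Int) : List (Int × Int) :=
  PySem.List.sorted2
    ((PySem.List.pyRange 0 n 1).map (fun i => (PySem.List.pyGetD price i 0, i + 1)))
    (fun x => x.1) (fun x => x.2)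

-- fuel for the current head's decrement phase: Python's `price1[pos][1] -= 1` only ever
-- runs with cap ≥ 1, so cap.toNat steps always suffice on states reached from this
-- function's own inputs (capacities start at i+1 ≥ 1)
def pvHeadFuel (l : List (Int × Int)) : Nat :=
  match l with
  | [] => 0
  | (_, c) :: _ => c.toNat

-- A's while loop, one Lean step per Python iteration (advance pos, or decrement cap by 1)
def pvLoopA : Int → Int → List (Int × Int) → Nat → Int
  | _, count, [], _ => count
  | k, count, (p, c) :: rest, fuel =>
    if k > 0 then
      if k < p then count
      else if k ≥ p * c then pvLoopA (k - p * c) (count + c) rest (pvHeadFuel rest)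
      else
        match fuel with
        | 0 => count
        | f + 1 => pvLoopA k count ((p, c - 1) :: rest) f
    else count
termination_by k count l fuel => (l.length, fuel)
decreasing_by
  · exact Prod.Lex.left _ _ (by simp)
  · exact Prod.Lex.right _ (by omega)

def buyMaximumProducts (n : Int) (k : Int) (price : List Int) : Int :=
  pvLoopA k 0 (pvPairs n price) (pvHeadFuel (pvPairs n price))

-- ===== PORT B =====
def pvLoopB : Int → Int → List (Int × Int) → Int
  | _, count, [] => count
  | k, count, (p, c) :: rest =>
    if k ≤ 0 ∨ k < p then count
    else
      let buy := if k ≥ p * c then c else PySem.Int.floordiv k p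
      pvLoopB (k - p * buy) (count + buy) rest

def buyMaximumProducts_alt (n : Int) (k : Int) (price : List Int) : Int :=
  pvLoopB k 0 (pvPairs n price)

-- ===== PRECONDITION & SPEC =====
-- Pre_ excludes exactly the inputs where A raises IndexError: price[i] for i in range(n) needs n ≤ len(price)
def Pre_buyMaximumProducts (n : Int) (k : Int) (price : List Int) : Prop :=
  n ≤ (price.length : Int)
instance (n : Int) (k : Int) (price : List Int) : Decidable (Pre_buyMaximumProducts n k price) := by
  unfold Pre_buyMaximumProducts; infer_instance

def pvWitness_buyMaximumProducts : Int × Int × List Int := (3, 10, [2, 1, 3])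

def Spec_buyMaximumProducts (n : Int) (k : Int) (price : List Int) (out : Int) : Prop := out = buyMaximumProducts_alt n k price
instance (n : Int) (k : Int) (price : List Int) (out : Int) : Decidable (Spec_buyMaximumProducts n k price out) := by unfold Spec_buyMaximumProducts; infer_instance

-- ===== CLAIM (what is proved, stated in full; the proofs are below) =====
def Claim_equal_buyMaximumProducts : Prop := ∀ (n : Int) (k : Int) (price : List Int), Dom_buyMaximumProducts n k price → Pre_buyMaximumProducts n k price → Spec_buyMaximumProducts n k price (buyMaximumProducts n k price)

-- ===== LEMMAS AND PROOFS =====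

lemma pvLoopA_nil (k count : Int) (fuel : Nat) : pvLoopA k count [] fuel = count := by
  rw [pvLoopA.eq_def]

lemma pvLoopA_cons (k count p c : Int) (rest : List (Int × Int)) (fuel : Nat) :
    pvLoopA k count ((p, c) :: rest) fuel =
      if k > 0 then
        if k < p then count
        else if k ≥ p * c then pvLoopA (k - p * c) (count + c) rest (pvHeadFuel rest)
        else match fuel with
          | 0 => count
          | f + 1 => pvLoopA k count ((p, c - 1) :: rest) f
      else count := by
  rw [pvLoopA.eq_def]

-- A's decrement phase: with 1 ≤ p ≤ k it steps cap down to q = k // p, then buys q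
lemma pvLoopA_dec (k count p : Int) (rest : List (Int × Int)) :
    ∀ (fuel : Nat) (c : Int), 1 ≤ p → p ≤ k →
      PySem.Int.floordiv k p ≤ c → (c - PySem.Int.floordiv k p).toNat ≤ fuel →
      pvLoopA k count ((p, c) :: rest) fuel =
        pvLoopA (k - p * PySem.Int.floordiv k p) (count + PySem.Int.floordiv k p) rest
          (pvHeadFuel rest) := by
  intro fuel
  induction fuel with
  | zero =>
    intro c hp hpk hqc hfuel
    have hq : PySem.Int.floordiv k p = c := by omega
    have hbuy : k ≥ p * c := by
      have := (PySem.Int.le_floordiv_iff_mul_le (a := k) (b := p) (q := c) (by omega)).mp (by omega)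
      nlinarith
    rw [pvLoopA_cons, if_pos (show k > 0 by omega), if_neg (show ¬ k < p by omega),
      if_pos hbuy, hq]
  | succ f ih =>
    intro c hp hpk hqc hfuel
    by_cases hq : PySem.Int.floordiv k p = c
    · have hbuy : k ≥ p * c := by
        have := (PySem.Int.le_floordiv_iff_mul_le (a := k) (b := p) (q := c) (by omega)).mp (by omega)
        nlinarith
      rw [pvLoopA_cons, if_pos (show k > 0 by omega), if_neg (show ¬ k < p by omega),
        if_pos hbuy, hq]
    · have hlt : PySem.Int.floordiv k p < c := by omega
      have hnbuy : ¬ k ≥ p * c := by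
        have := (PySem.Int.floordiv_lt_iff_lt_mul (a := k) (b := p) (q := c) (by omega)).mp hlt
        nlinarith
      rw [pvLoopA_cons, if_pos (show k > 0 by omega), if_neg (show ¬ k < p by omega),
        if_neg hnbuy]
      exact ih (c - 1) hp hpk (by omega) (by omega)

-- main loop equivalence on lists whose capacities are all ≥ 1
lemma pvLoop_eq : ∀ (L : List (Int × Int)), (∀ x ∈ L, 1 ≤ x.2) → ∀ (k count : Int),
    pvLoopA k count L (pvHeadFuel L) = pvLoopB k count L := by
  intro L
  induction L with
  | nil => intro _ k count; rw [pvLoopA_nil, pvLoopB]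
  | cons hd rest ih =>
    intro hinv k count
    obtain ⟨p, c⟩ := hd
    have hc : 1 ≤ c := hinv (p, c) (by simp)
    have hrest : ∀ x ∈ rest, 1 ≤ x.2 := fun x hx => hinv x (by simp [hx])
    by_cases hk : k > 0
    · by_cases hkp : k < p
      · rw [pvLoopA_cons, pvLoopB, if_pos hk, if_pos hkp, if_pos (Or.inr hkp)]
      · by_cases hbuy : k ≥ p * c
        · rw [pvLoopA_cons, pvLoopB, if_pos hk, if_neg hkp, if_pos hbuy,
            if_neg (show ¬ (k ≤ 0 ∨ k < p) by omega)]
          simp only [hbuy, if_pos]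
          exact ih hrest _ _
        · -- decrement phase: p ≥ 1 here since c ≥ 1 and k < p*c with k > 0
          have hp : 1 ≤ p := by nlinarith
          have hpk : p ≤ k := by omega
          have hq1 : 1 ≤ PySem.Int.floordiv k p :=
            (PySem.Int.le_floordiv_iff_mul_le (a := k) (b := p) (q := 1) (by omega)).mpr (by omega)
          have hqc : PySem.Int.floordiv k p < c :=
            (PySem.Int.floordiv_lt_iff_lt_mul (a := k) (b := p) (q := c) (by omega)).mpr
              (by nlinarith)
          have hA := pvLoopA_dec k count p rest c.toNat c hp hpk (by omega) (by omega)
          rw [show pvHeadFuel ((p, c) :: rest) = c.toNat from rfl, hA, pvLoopB,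
            if_neg (show ¬ (k ≤ 0 ∨ k < p) by omega)]
          simp only [hbuy, if_false]
          exact ih hrest _ _
    · rw [pvLoopA_cons, pvLoopB, if_neg hk, if_pos (Or.inl (by omega))]

lemma pvPairs_caps (n : Int) (price : List Int) :
    ∀ x ∈ pvPairs n price, 1 ≤ x.2 := by
  intro x hx
  unfold pvPairs at hx
  have hx' := (PySem.List.sorted2_perm _ _ _ _).mem_iff.mp hx
  simp only [List.mem_map] at hx'
  obtain ⟨i, hi, rfl⟩ := hx'
  have := (PySem.List.mem_pyRange_one).mp hi
  simp only
  omega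

-- ===== VERDICT (by name: the statement is the Claim_ definition above) =====
theorem buyMaximumProducts_spec : Claim_equal_buyMaximumProducts := by
  intro n k price _ _
  unfold Spec_buyMaximumProducts buyMaximumProducts buyMaximumProducts_alt
  exact pvLoop_eq _ (pvPairs_caps n price) k 0
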